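-- pv_equiv track=rewrite | github.com/AdamBignell/ICTS-vs-EPEA | icts.py | true_distance_bfs
-- ===== SOURCE A (Python) =====
-- import collections
--
-- def true_distance_bfs(my_map, goal):
--     h = dict()
--     q = collections.deque()
--     indiv_ops = [(1, 0), (-1, 0), (0, 1), (0, -1), (0, 0)]
--     q.append((goal, 0))
--     visited = set()
--     visited.add(goal)
--     while q:
--         (x,y), this_h = q.popleft()
--         h[(x,y)] = this_h
--         children = []
--         for op in indiv_ops:
--             new_child = (x+op[0], y+op[1])
--             if not my_map[new_child[0]][new_child[1]] and new_child not in visited: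
--                 visited.add(new_child)
--                 children.append((new_child, this_h+1))
--         if children:
--             q.extend(children)
--     return h
-- ===== SOURCE B (Python) =====
-- def true_distance_bfs(my_map, goal):
--     # Level-synchronous BFS: process whole frontiers with a running depth counter
--     # instead of a deque of (cell, depth) pairs.
--     h = {}
--     visited = {goal}
--     frontier = [goal]
--     d = 0
--     while frontier:
--         nxt = []
--         for (x, y) in frontier:
--             h[(x, y)] = d
--             for nc in ((x + 1, y), (x - 1, y), (x, y + 1), (x, y - 1)):
--                 if not my_map[nc[0]][nc[1]] and nc not in visited:
--                     visited.add(nc)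
--                     nxt.append(nc)
--         frontier = nxt
--         d += 1
--     return h
-- ===== Notes on version B (the rewrite author's own statement) =====
-- stated objective: simpler
-- what changed: Replaces the deque of (cell, depth) pairs by level-synchronous BFS: a plain frontier list per distance level with one running depth counter d (no per-entry depth bookkeeping, no deque, and the redundant (0,0) pseudo-move of A's op list dropped since the cell itself is always already visited).
import Mathlib
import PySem

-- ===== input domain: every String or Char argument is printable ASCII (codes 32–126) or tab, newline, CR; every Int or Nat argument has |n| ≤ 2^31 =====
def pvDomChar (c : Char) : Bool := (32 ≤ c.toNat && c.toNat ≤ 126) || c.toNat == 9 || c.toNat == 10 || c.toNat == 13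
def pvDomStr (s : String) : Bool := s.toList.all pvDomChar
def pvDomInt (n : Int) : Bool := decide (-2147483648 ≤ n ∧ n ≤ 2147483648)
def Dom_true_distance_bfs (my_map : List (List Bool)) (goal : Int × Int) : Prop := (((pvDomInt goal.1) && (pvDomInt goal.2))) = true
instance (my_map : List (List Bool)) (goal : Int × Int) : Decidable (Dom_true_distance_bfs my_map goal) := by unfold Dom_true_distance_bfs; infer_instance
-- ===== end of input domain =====

-- B replaces A's deque of (cell, depth) pairs by level-synchronous BFS (a frontier list per
-- distance level with one running depth counter); same return value, objective: simpler.


-- ===== PORT A =====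
-- shared access helper: my_map[x][y] with Python's negative-index wrap; `none` = IndexError
def pvCellVal (m : List (List Bool)) (c : Int × Int) : Option Bool :=
  (PySem.List.pyGet? m c.1).bind fun row => PySem.List.pyGet? row c.2

-- exact where the access is in range; the `true` default is taken only where Python raises
-- IndexError, and exactly those runs are excluded by Pre_ below
def pvWall (m : List (List Bool)) (c : Int × Int) : Bool :=
  (pvCellVal m c).getD true

def pvW (m : List (List Bool)) : Nat := (m.map List.length).foldr Nat.max 0

-- loop budget for the `while` loops: every enqueued cell lies in a space of at most
-- 4*H*W + 1 cells (pvSpace below), so this many iterations always suffice (proved below)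
def pvSteps (m : List (List Bool)) : Nat := 4 * m.length * pvW m + 2

def pvOps : List (Int × Int) := [(1, 0), (-1, 0), (0, 1), (0, -1), (0, 0)]

def pvStepA (m : List (List Bool)) (c : Int × Int) (dh : Int)
    (st : PySem.Set (Int × Int) × List ((Int × Int) × Int)) (op : Int × Int) :
    PySem.Set (Int × Int) × List ((Int × Int) × Int) :=
  let nc : Int × Int := (c.1 + op.1, c.2 + op.2)
  if pvWall m nc = false ∧ PySem.Set.contains st.1 nc = false then
    (PySem.Set.add st.1 nc, st.2 ++ [(nc, dh + 1)])
  else st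

def pvLoopA (m : List (List Bool)) :
    Nat → List ((Int × Int) × Int) → PySem.Set (Int × Int) → PySem.Dict (Int × Int) Int →
      PySem.Dict (Int × Int) Int
  | 0, _, _, h => h
  | _ + 1, [], _, h => h
  | n + 1, (c, dh) :: rest, visited, h =>
      let h2 := h.insert c dh
      let st := pvOps.foldl (pvStepA m c dh) (visited, [])
      pvLoopA m n (rest ++ st.2) st.1 h2

def true_distance_bfs (my_map : List (List Bool)) (goal : Int × Int) : List (Int × Int × Int) :=
  (pvLoopA my_map (pvSteps my_map) [(goal, 0)]
      (PySem.Set.add PySem.Set.empty goal) PySem.Dict.empty).items.map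
    (fun p => (p.1.1, p.1.2, p.2))

-- ===== PORT B =====
def pvNbrs (c : Int × Int) : List (Int × Int) :=
  [(c.1 + 1, c.2), (c.1 - 1, c.2), (c.1, c.2 + 1), (c.1, c.2 - 1)]

def pvScan (m : List (List Bool)) (r : PySem.Set (Int × Int) × List (Int × Int))
    (nc : Int × Int) : PySem.Set (Int × Int) × List (Int × Int) :=
  if pvWall m nc = false ∧ PySem.Set.contains r.1 nc = false then
    (PySem.Set.add r.1 nc, r.2 ++ [nc])
  else r

def pvVisit (m : List (List Bool)) (d : Int)
    (t : PySem.Dict (Int × Int) Int × PySem.Set (Int × Int) × List (Int × Int))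
    (c : Int × Int) :
    PySem.Dict (Int × Int) Int × PySem.Set (Int × Int) × List (Int × Int) :=
  (t.1.insert c d, (pvNbrs c).foldl (pvScan m) t.2)

def pvLoopB (m : List (List Bool)) :
    Nat → List (Int × Int) → Int → PySem.Set (Int × Int) → PySem.Dict (Int × Int) Int →
      PySem.Dict (Int × Int) Int
  | 0, _, _, _, h => h
  | _ + 1, [], _, _, h => h
  | n + 1, c :: rest, d, visited, h =>
      let t := (c :: rest).foldl (pvVisit m d) (h, visited, [])
      pvLoopB m n t.2.2 (d + 1) t.2.1 t.1

def true_distance_bfs_alt (my_map : List (List Bool)) (goal : Int × Int) :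
    List (Int × Int × Int) :=
  (pvLoopB my_map (pvSteps my_map) [goal] 0
      (PySem.Set.add PySem.Set.empty goal) PySem.Dict.empty).items.map
    (fun p => (p.1.1, p.1.2, p.2))

-- ===== PRECONDITION & SPEC =====
def pvFree (m : List (List Bool)) (c : Int × Int) : Bool := pvCellVal m c == some false

def pvGrow (m : List (List Bool)) (s : List (Int × Int)) : List (Int × Int) :=
  PySem.Set.update s (s.flatMap fun c => (pvNbrs c).filter (pvFree m))

-- the cells BFS reaches from goal through free cells: the fixed point of one-step
-- neighbour expansion on the finite index space (pvSteps m iterations saturate it)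
def pvReach (m : List (List Bool)) (goal : Int × Int) : List (Int × Int) :=
  (pvGrow m)^[pvSteps m] [goal]

-- Pre_ excludes exactly the inputs on which the Python raises IndexError: A indexes
-- my_map at all five offsets of every cell it reaches from goal through free cells, so it
-- returns normally iff all those accesses are in range.  (The two ports totalize the failing
-- access as a wall in the same way, so their equality below in fact holds on every input;
-- Pre_ is stated because only inside it does port A compute what the Python A computes.)
def Pre_true_distance_bfs (my_map : List (List Bool)) (goal : Int × Int) : Prop :=
  ∀ c ∈ pvReach my_map goal,
    (pvCellVal my_map c).isSome = true ∧
      ∀ x ∈ pvNbrs c, (pvCellVal my_map x).isSome = true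

instance (my_map : List (List Bool)) (goal : Int × Int) :
    Decidable (Pre_true_distance_bfs my_map goal) := by
  unfold Pre_true_distance_bfs; infer_instance

def pvWitness_true_distance_bfs : List (List Bool) × (Int × Int) :=
  ([[true, true, true], [true, true, true], [true, true, true]], (1, 1))

def Spec_true_distance_bfs (my_map : List (List Bool)) (goal : Int × Int)
    (out : List (Int × Int × Int)) : Prop :=
  out = true_distance_bfs_alt my_map goal

instance (my_map : List (List Bool)) (goal : Int × Int) (out : List (Int × Int × Int)) :
    Decidable (Spec_true_distance_bfs my_map goal out) := by
  unfold Spec_true_distance_bfs; infer_instance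

-- ===== CLAIM (what is proved, stated in full; the proofs are below) =====
def Claim_equal_true_distance_bfs : Prop :=
  ∀ (my_map : List (List Bool)) (goal : Int × Int), Dom_true_distance_bfs my_map goal →
    Pre_true_distance_bfs my_map goal →
    Spec_true_distance_bfs my_map goal (true_distance_bfs my_map goal)

-- ===== LEMMAS AND PROOFS =====
lemma pvLoopA_nil (m : List (List Bool)) (n : Nat) (v : PySem.Set (Int × Int))
    (h : PySem.Dict (Int × Int) Int) : pvLoopA m n [] v h = h := by
  cases n <;> rfl

lemma pvLoopB_nil (m : List (List Bool)) (n : Nat) (d : Int) (v : PySem.Set (Int × Int))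
    (h : PySem.Dict (Int × Int) Int) : pvLoopB m n [] d v h = h := by
  cases n <;> rfl

lemma pvScan_acc (m : List (List Bool)) :
    ∀ (ns : List (Int × Int)) (v : PySem.Set (Int × Int)) (l : List (Int × Int)),
      ns.foldl (pvScan m) (v, l)
        = ((ns.foldl (pvScan m) (v, [])).1, l ++ (ns.foldl (pvScan m) (v, [])).2) := by
  intro ns
  induction ns with
  | nil => intro v l; simp
  | cons nc ns ih =>
      intro v l
      simp only [List.foldl_cons, pvScan]
      by_cases hc : pvWall m nc = false ∧ PySem.Set.contains v nc = false
      · rw [if_pos hc, if_pos hc, ih (PySem.Set.add v nc) (l ++ [nc]),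
          ih (PySem.Set.add v nc) ([] ++ [nc])]
        simp
      · rw [if_neg hc, if_neg hc]; exact ih v l

lemma pvStepA_acc (m : List (List Bool)) (c : Int × Int) (dh : Int) :
    ∀ (ops : List (Int × Int)) (v : PySem.Set (Int × Int)) (l : List ((Int × Int) × Int)),
      ops.foldl (pvStepA m c dh) (v, l)
        = ((ops.foldl (pvStepA m c dh) (v, [])).1,
           l ++ (ops.foldl (pvStepA m c dh) (v, [])).2) := by
  intro ops
  induction ops with
  | nil => intro v l; simp
  | cons op ops ih =>
      intro v l
      simp only [List.foldl_cons, pvStepA]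
      by_cases hc : pvWall m (c.1 + op.1, c.2 + op.2) = false ∧
          PySem.Set.contains v (c.1 + op.1, c.2 + op.2) = false
      · rw [if_pos hc, if_pos hc,
          ih (PySem.Set.add v (c.1 + op.1, c.2 + op.2))
            (l ++ [((c.1 + op.1, c.2 + op.2), dh + 1)]),
          ih (PySem.Set.add v (c.1 + op.1, c.2 + op.2))
            ([] ++ [((c.1 + op.1, c.2 + op.2), dh + 1)])]
        simp
      · rw [if_neg hc, if_neg hc]; exact ih v l

lemma pvScan_contains (m : List (List Bool)) :
    ∀ (ns : List (Int × Int)) (r : PySem.Set (Int × Int) × List (Int × Int)) (x : Int × Int),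
      PySem.Set.contains r.1 x = true →
      PySem.Set.contains ((ns.foldl (pvScan m) r)).1 x = true := by
  intro ns
  induction ns with
  | nil => intro r x hx; simpa using hx
  | cons nc ns ih =>
      intro r x hx
      simp only [List.foldl_cons, pvScan]
      by_cases hc : pvWall m nc = false ∧ PySem.Set.contains r.1 nc = false
      · rw [if_pos hc]
        refine ih _ x ?_
        have hx' : x ∈ r.1 := (PySem.Set.contains_iff _ _).1 hx
        exact (PySem.Set.contains_iff _ _).2 ((PySem.Set.mem_add _ _ _).2 (Or.inl hx'))
      · rw [if_neg hc]; exact ih r x hx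

lemma pvCell_eq (m : List (List Bool)) (c : Int × Int) (dh : Int) :
    ∀ (ops : List (Int × Int)) (v : PySem.Set (Int × Int)),
      ops.foldl (pvStepA m c dh) (v, []) =
        (((ops.map fun o => (c.1 + o.1, c.2 + o.2)).foldl (pvScan m) (v, [])).1,
         ((ops.map fun o => (c.1 + o.1, c.2 + o.2)).foldl (pvScan m) (v, [])).2.map
           (fun x => (x, dh + 1))) := by
  intro ops
  induction ops with
  | nil => intro v; simp
  | cons op ops ih =>
      intro v
      simp only [List.foldl_cons, List.map_cons, pvStepA, pvScan]
      by_cases hc : pvWall m (c.1 + op.1, c.2 + op.2) = false ∧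
          PySem.Set.contains v (c.1 + op.1, c.2 + op.2) = false
      · rw [if_pos hc, if_pos hc,
          pvStepA_acc m c dh ops _ ([] ++ [((c.1 + op.1, c.2 + op.2), dh + 1)]),
          pvScan_acc m _ _ ([] ++ [(c.1 + op.1, c.2 + op.2)]), ih]
        simp
      · rw [if_neg hc, if_neg hc]; exact ih v

lemma pvStepA_self (m : List (List Bool)) (c : Int × Int) (dh : Int)
    (st : PySem.Set (Int × Int) × List ((Int × Int) × Int))
    (hc : PySem.Set.contains st.1 c = true) :
    pvStepA m c dh st (((0 : Int), (0 : Int))) = st := by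
  have hmem : c ∈ st.1 := (PySem.Set.contains_iff _ _).1 hc
  simp [pvStepA, hmem]

lemma pvMapOps (c : Int × Int) :
    (([(1, 0), (-1, 0), (0, 1), (0, -1)] : List (Int × Int)).map
        fun o => (c.1 + o.1, c.2 + o.2)) = pvNbrs c := by
  simp [pvNbrs, sub_eq_add_neg]

lemma pvCellA (m : List (List Bool)) (c : Int × Int) (dh : Int) (v : PySem.Set (Int × Int))
    (hc : PySem.Set.contains v c = true) :
    pvOps.foldl (pvStepA m c dh) (v, []) =
      (((pvNbrs c).foldl (pvScan m) (v, [])).1,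
       ((pvNbrs c).foldl (pvScan m) (v, [])).2.map (fun x => (x, dh + 1))) := by
  have h5 : pvOps = [(1, 0), (-1, 0), (0, 1), (0, -1)] ++ [(((0 : Int), (0 : Int)))] := rfl
  rw [h5, List.foldl_append]
  rw [pvCell_eq m c dh [(1, 0), (-1, 0), (0, 1), (0, -1)] v, pvMapOps]
  simp only [List.foldl_cons, List.foldl_nil]
  exact pvStepA_self m c dh _ (pvScan_contains m (pvNbrs c) (v, []) c hc)

lemma pvVisit_split (m : List (List Bool)) (d : Int) :
    ∀ (F : List (Int × Int)) (h : PySem.Dict (Int × Int) Int)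
      (r : PySem.Set (Int × Int) × List (Int × Int)),
      F.foldl (pvVisit m d) (h, r)
        = (F.foldl (fun hh c => hh.insert c d) h,
           F.foldl (fun r c => (pvNbrs c).foldl (pvScan m) r) r) := by
  intro F
  induction F with
  | nil => intro h r; rfl
  | cons c F ih => intro h r; simp only [List.foldl_cons, pvVisit]; exact ih _ _

lemma pvScan_spec1 (m : List (List Bool)) :
    ∀ (ns : List (Int × Int)) (v : PySem.Set (Int × Int)) (l : List (Int × Int)),
      ∃ w, ns.foldl (pvScan m) (v, l) = (v ++ w, l ++ w) ∧ w.Nodup ∧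
        ∀ x ∈ w, pvWall m x = false ∧ x ∉ v := by
  intro ns
  induction ns with
  | nil => intro v l; exact ⟨[], by simp⟩
  | cons nc ns ih =>
      intro v l
      simp only [List.foldl_cons, pvScan]
      by_cases hc : pvWall m nc = false ∧ PySem.Set.contains v nc = false
      · rw [if_pos hc]
        have hnv : nc ∉ v := by
          intro hmem
          have hmc := (PySem.Set.contains_iff v nc).2 hmem
          rw [hc.2] at hmc; exact absurd hmc (by simp)
        have hadd : PySem.Set.add v nc = v ++ [nc] := PySem.Set.add_of_not_mem hnv
        rw [hadd]
        obtain ⟨w, heq, hnd, hprop⟩ := ih (v ++ [nc]) (l ++ [nc])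
        refine ⟨nc :: w, ?_, ?_, ?_⟩
        · rw [heq]; simp
        · refine List.nodup_cons.2 ⟨?_, hnd⟩
          intro hmem
          exact (hprop nc hmem).2 (by simp)
        · intro x hx
          rw [List.mem_cons] at hx
          rcases hx with rfl | hx
          · exact ⟨hc.1, hnv⟩
          · obtain ⟨h2, h3⟩ := hprop x hx
            exact ⟨h2, fun hxv => h3 (by simp [hxv])⟩
      · rw [if_neg hc]
        exact ih v l

lemma pvLevel_spec1 (m : List (List Bool)) :
    ∀ (F : List (Int × Int)) (v : PySem.Set (Int × Int)) (l : List (Int × Int)),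
      ∃ w, F.foldl (fun r c => (pvNbrs c).foldl (pvScan m) r) (v, l) = (v ++ w, l ++ w) ∧
        w.Nodup ∧ ∀ x ∈ w, pvWall m x = false ∧ x ∉ v := by
  intro F
  induction F with
  | nil => intro v l; exact ⟨[], by simp⟩
  | cons c F ih =>
      intro v l
      simp only [List.foldl_cons]
      obtain ⟨w1, heq1, hnd1, hp1⟩ := pvScan_spec1 m (pvNbrs c) v l
      rw [heq1]
      obtain ⟨w2, heq2, hnd2, hp2⟩ := ih (v ++ w1) (l ++ w1)
      refine ⟨w1 ++ w2, ?_, ?_, ?_⟩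
      · rw [heq2]; simp
      · refine List.Nodup.append hnd1 hnd2 ?_
        intro x hx1 hx2
        exact (hp2 x hx2).2 (by simp [hx1])
      · intro x hx
        rcases List.mem_append.1 hx with hx | hx
        · exact hp1 x hx
        · exact ⟨(hp2 x hx).1, fun hxv => (hp2 x hx).2 (by simp [hxv])⟩

lemma pvLevelA (m : List (List Bool)) (d : Int) :
    ∀ (F K : List (Int × Int)) (v : PySem.Set (Int × Int)) (h : PySem.Dict (Int × Int) Int)
      (n : Nat), (∀ c ∈ F, PySem.Set.contains v c = true) →
      pvLoopA m (F.length + n) (F.map (fun c => (c, d)) ++ K.map (fun c => (c, d + 1))) v h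
        = pvLoopA m n
            ((F.foldl (fun r c => (pvNbrs c).foldl (pvScan m) r) (v, K)).2.map
              (fun c => (c, d + 1)))
            (F.foldl (fun r c => (pvNbrs c).foldl (pvScan m) r) (v, K)).1
            (F.foldl (fun hh c => hh.insert c d) h) := by
  intro F
  induction F with
  | nil => intro K v h n _; simp
  | cons c F ih =>
      intro K v h n hF
      have hlen : (c :: F).length + n = (F.length + n) + 1 := by
        simp [List.length_cons]; omega
      rw [hlen]
      simp only [List.map_cons, List.cons_append, pvLoopA]
      rw [pvCellA m c d v (hF c (by simp))]
      have hq : (F.map (fun c => (c, d)) ++ K.map (fun c => (c, d + 1)))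
            ++ (((pvNbrs c).foldl (pvScan m) (v, [])).2.map (fun x => (x, d + 1)))
          = F.map (fun c => (c, d)) ++
            ((K ++ ((pvNbrs c).foldl (pvScan m) (v, [])).2).map (fun c => (c, d + 1))) := by
        simp [List.map_append]
      rw [hq]
      have hF' : ∀ c' ∈ F,
          PySem.Set.contains ((pvNbrs c).foldl (pvScan m) (v, [])).1 c' = true :=
        fun c' hc' => pvScan_contains m (pvNbrs c) (v, []) c' (hF c' (by simp [hc']))
      rw [ih (K ++ ((pvNbrs c).foldl (pvScan m) (v, [])).2)
          ((pvNbrs c).foldl (pvScan m) (v, [])).1 (h.insert c d) n hF']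
      simp only [List.foldl_cons]
      rw [pvScan_acc m (pvNbrs c) v K]

-- the finite space every enqueued cell lives in
def pvSpace (m : List (List Bool)) (goal : Int × Int) : Finset (Int × Int) :=
  insert goal
    ((Finset.range (2 * m.length) ×ˢ Finset.range (2 * pvW m)).image
      (fun p => ((p.1 : Int) - m.length, (p.2 : Int) - pvW m)))

lemma pvW_le (m : List (List Bool)) : ∀ r ∈ m, r.length ≤ pvW m := by
  induction m with
  | nil => simp
  | cons a m ih =>
      intro r hr
      have hstep : pvW (a :: m) = Nat.max a.length (pvW m) := rfl
      rw [List.mem_cons] at hr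
      rcases hr with rfl | hr
      · rw [hstep]; exact Nat.le_max_left _ _
      · exact le_trans (ih r hr) (by rw [hstep]; exact Nat.le_max_right _ _)

lemma pvWall_mem (m : List (List Bool)) (goal : Int × Int) (x : Int × Int)
    (hw : pvWall m x = false) : x ∈ pvSpace m goal := by
  have hval : pvCellVal m x = some false := by
    unfold pvWall at hw
    cases hv : pvCellVal m x with
    | none => rw [hv] at hw; simp at hw
    | some b => rw [hv] at hw; simp at hw; simp [hw]
  unfold pvCellVal at hval
  cases hrow : PySem.List.pyGet? m x.1 with
  | none => rw [hrow] at hval; simp at hval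
  | some row =>
      rw [hrow] at hval
      simp only [Option.bind_some] at hval
      have h1 : -(m.length : Int) ≤ x.1 ∧ x.1 < m.length := by
        by_contra hcon
        have hnone : PySem.List.pyGet? m x.1 = none := by
          rw [PySem.List.pyGet?_eq_none_iff]
          unfold PySem.Raise.InRange
          omega
        rw [hnone] at hrow; exact absurd hrow (by simp)
      have h2 : -(row.length : Int) ≤ x.2 ∧ x.2 < row.length := by
        by_contra hcon
        have hnone : PySem.List.pyGet? row x.2 = none := by
          rw [PySem.List.pyGet?_eq_none_iff]
          unfold PySem.Raise.InRange
          omega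
        rw [hnone] at hval; exact absurd hval (by simp)
      have hrm : row ∈ m := PySem.List.mem_of_pyGet?_eq_some m hrow
      have hwle : row.length ≤ pvW m := pvW_le m row hrm
      unfold pvSpace
      apply Finset.mem_insert_of_mem
      rw [Finset.mem_image]
      refine ⟨((x.1 + m.length).toNat, (x.2 + pvW m).toNat), ?_, ?_⟩
      · rw [Finset.mem_product, Finset.mem_range, Finset.mem_range]
        constructor <;> omega
      · have e1 : (((x.1 + m.length).toNat : Int)) = x.1 + m.length := by omega
        have e2 : (((x.2 + pvW m).toNat : Int)) = x.2 + pvW m := by omega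
        simp only [e1, e2]
        ext <;> simp

lemma pvSpace_card (m : List (List Bool)) (goal : Int × Int) :
    (pvSpace m goal).card ≤ 4 * m.length * pvW m + 1 := by
  unfold pvSpace
  refine le_trans (Finset.card_insert_le _ _) ?_
  refine le_trans (Nat.succ_le_succ (Finset.card_image_le)) ?_
  rw [Finset.card_product, Finset.card_range, Finset.card_range]
  ring_nf; omega

lemma pvAppend_card (v w : List (Int × Int)) (_hvnd : v.Nodup) (hwnd : w.Nodup)
    (hdisj : ∀ x ∈ w, x ∉ v) :
    (v ++ w).toFinset.card = v.toFinset.card + w.length := by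
  rw [List.toFinset_append, Finset.card_union_of_disjoint, List.toFinset_card_of_nodup hwnd]
  rw [Finset.disjoint_right]
  intro x hxw hxv
  exact hdisj x (List.mem_toFinset.1 hxw) (List.mem_toFinset.1 hxv)

lemma pvMainAux (m : List (List Bool)) (goal : Int × Int) :
    ∀ (gap : Nat) (F : List (Int × Int)) (d : Int) (v : PySem.Set (Int × Int))
      (h : PySem.Dict (Int × Int) Int) (fa fb : Nat),
      v.Nodup → (∀ x ∈ v, x ∈ pvSpace m goal) → (∀ c ∈ F, PySem.Set.contains v c = true) →
      ((pvSpace m goal).card - v.toFinset.card ≤ gap) →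
      (gap + F.length ≤ fa) → (gap + 1 ≤ fb) →
      pvLoopA m fa (F.map (fun c => (c, d))) v h = pvLoopB m fb F d v h := by
  intro gap
  induction gap using Nat.strong_induction_on with
  | _ gap ih =>
    intro F d v h fa fb hvnd hvsp hF hg hfa hfb
    match F with
    | [] => simp [pvLoopA_nil, pvLoopB_nil]
    | c :: F' =>
      match fb with
      | 0 => omega
      | fb' + 1 =>
        -- one level of B
        have hBstep : pvLoopB m (fb' + 1) (c :: F') d v h
            = pvLoopB m fb'
                ((c :: F').foldl (pvVisit m d) (h, v, [])).2.2 (d + 1)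
                ((c :: F').foldl (pvVisit m d) (h, v, [])).2.1
                ((c :: F').foldl (pvVisit m d) (h, v, [])).1 := rfl
        rw [hBstep, pvVisit_split]
        -- one level of A
        have hfa1 : (c :: F').length ≤ fa := by
          simp only [List.length_cons] at hfa ⊢; omega
        have hlev := pvLevelA m d (c :: F') [] v h (fa - (c :: F').length) hF
        have hfa2 : (c :: F').length + (fa - (c :: F').length) = fa := by omega
        rw [hfa2, List.map_nil, List.append_nil] at hlev
        rw [hlev]
        obtain ⟨w, heqw, hwnd, hwprop⟩ := pvLevel_spec1 m (c :: F') v []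
        rw [heqw]
        simp only [List.nil_append]
        by_cases hwnil : w = []
        · subst hwnil; simp [pvLoopA_nil, pvLoopB_nil]
        · -- recurse with a strictly smaller gap
          have hwlen : 1 ≤ w.length := by
            cases w with
            | nil => exact absurd rfl hwnil
            | cons _ _ => simp
          have hsub : ∀ x ∈ v ++ w, x ∈ pvSpace m goal := by
            intro x hx
            rcases List.mem_append.1 hx with hx | hx
            · exact hvsp x hx
            · exact pvWall_mem m goal x (hwprop x hx).1
          have hnd : (v ++ w).Nodup :=
            List.Nodup.append hvnd hwnd (fun x hx1 hx2 => (hwprop x hx2).2 hx1)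
          have hcard : (v ++ w).toFinset.card = v.toFinset.card + w.length :=
            pvAppend_card v w hvnd hwnd (fun x hx => (hwprop x hx).2)
          have hcardle : (v ++ w).toFinset.card ≤ (pvSpace m goal).card := by
            apply Finset.card_le_card
            intro x hx
            exact hsub x (List.mem_toFinset.1 hx)
          have hglt : gap - w.length < gap := by omega
          have hFw : ∀ c' ∈ w, PySem.Set.contains (v ++ w) c' = true := by
            intro c' hc'
            exact (PySem.Set.contains_iff _ _).2 (List.mem_append.2 (Or.inr hc'))
          refine ih (gap - w.length) hglt w (d + 1) (v ++ w) _ (fa - (c :: F').length) fb'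
            hnd hsub hFw ?_ ?_ ?_
          · omega
          · have hlen3 : (c :: F').length = F'.length + 1 := by simp
            omega
          · omega

lemma pvPortsEq (my_map : List (List Bool)) (goal : Int × Int) :
    true_distance_bfs my_map goal = true_distance_bfs_alt my_map goal := by
  unfold true_distance_bfs true_distance_bfs_alt
  have hv0 : PySem.Set.add PySem.Set.empty goal = [goal] := rfl
  have hmain := pvMainAux my_map goal ((pvSpace my_map goal).card - 1)
    [goal] 0 [goal] PySem.Dict.empty (pvSteps my_map) (pvSteps my_map)
    (by simp) (by simp [pvSpace]) (by simp) (by simp)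
    (by have := pvSpace_card my_map goal; simp [pvSteps]; omega)
    (by have := pvSpace_card my_map goal; simp [pvSteps]; omega)
  rw [hv0]
  have hq0 : ([((goal : Int × Int), (0 : Int))] : List ((Int × Int) × Int))
      = [goal].map (fun c => (c, (0 : Int))) := rfl
  rw [hq0, hmain]

-- ===== VERDICT (by name: the statement is the Claim_ definition above) =====
theorem true_distance_bfs_spec : Claim_equal_true_distance_bfs := by
  unfold Claim_equal_true_distance_bfs
  intro my_map goal _hdom _hpre
  unfold Spec_true_distance_bfs
  exact pvPortsEq my_map goal
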